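-- pv_equiv track=rewrite | github.com/ujjawal40/Gnosis | 03_representation_learning/02_tokenization/implementation.py | _merge_pair
-- ===== SOURCE A (Python) =====
-- from typing import List, Dict, Tuple
--
-- def _merge_pair(word_freqs: Dict[Tuple, int],
--                 pair: Tuple) -> Dict[Tuple, int]:
--     """Merge all occurrences of pair in the vocabulary."""
--     new_freqs = {}
--     bigram = pair
--     replacement = pair[0] + pair[1]
--
--     for word, freq in word_freqs.items():
--         new_word = []
--         i = 0
--         while i < len(word):
--             if i < len(word) - 1 and word[i] == bigram[0] and word[i + 1] == bigram[1]:
--                 new_word.append(replacement)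
--                 i += 2
--             else:
--                 new_word.append(word[i])
--                 i += 1
--         new_freqs[tuple(new_word)] = freq
--
--     return new_freqs
-- ===== SOURCE B (Python) =====
-- from typing import Dict, Tuple
--
-- def _merge_pair(word_freqs: Dict[Tuple, int],
--                 pair: Tuple) -> Dict[Tuple, int]:
--     """Merge all occurrences of pair: single pass with a one-token pending buffer."""
--     merged = pair[0] + pair[1]
--     new_freqs = {}
--     for word, freq in word_freqs.items():
--         out = []
--         prev = None
--         for tok in word:
--             if prev is None:
--                 prev = tok
--             elif prev == pair[0] and tok == pair[1]:
--                 out.append(merged)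
--                 prev = None
--             else:
--                 out.append(prev)
--                 prev = tok
--         if prev is not None:
--             out.append(prev)
--         new_freqs[tuple(out)] = freq
--     return new_freqs
-- ===== Notes on version B (the rewrite author's own statement) =====
-- stated objective: alternative
-- what changed: Replaces A's index-driven while loop (word[i]/word[i+1] lookahead, i += 2 on a merge) with a single structural pass over the tokens keeping a one-token pending buffer ('prev') that is cleared after a merge and flushed at the end.
import Mathlib
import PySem

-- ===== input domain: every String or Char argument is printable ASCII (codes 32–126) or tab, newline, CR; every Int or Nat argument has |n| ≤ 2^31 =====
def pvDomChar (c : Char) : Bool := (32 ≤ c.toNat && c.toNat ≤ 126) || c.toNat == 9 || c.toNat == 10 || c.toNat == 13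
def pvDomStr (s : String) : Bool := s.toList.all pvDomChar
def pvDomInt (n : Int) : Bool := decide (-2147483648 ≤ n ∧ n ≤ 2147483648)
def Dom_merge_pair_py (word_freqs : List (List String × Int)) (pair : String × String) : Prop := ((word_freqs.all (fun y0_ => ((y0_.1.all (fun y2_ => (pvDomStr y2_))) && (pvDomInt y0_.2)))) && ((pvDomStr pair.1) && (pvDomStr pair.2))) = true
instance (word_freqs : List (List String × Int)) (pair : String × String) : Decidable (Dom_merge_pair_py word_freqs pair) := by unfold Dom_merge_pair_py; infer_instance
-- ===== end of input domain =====

-- B rewrites A's index-based while loop (i += 2 after a merge) as a single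
-- structural pass over the tokens with a one-token pending buffer (objective: alternative).

-- ===== PORT A =====
-- A's inner while loop: index i into word, append replacement and i += 2 on a
-- match, else append word[i] and i += 1.  (word[i] is always in range when read,
-- guarded by i < len; getD's default is never used.)
def mergeLoopA (word : List String) (pair : String × String) (i : Nat)
    (new_word : List String) : List String :=
  if i < word.length then
    if i < word.length - 1 ∧ word.getD i "" = pair.1 ∧ word.getD (i+1) "" = pair.2 then
      mergeLoopA word pair (i+2) (new_word ++ [pair.1 ++ pair.2])
    else
      mergeLoopA word pair (i+1) (new_word ++ [word.getD i ""])
  else new_word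
termination_by word.length - i

def merge_pair_py (word_freqs : List (List String × Int)) (pair : String × String) :
    List (List String × Int) :=
  (word_freqs.foldl
    (fun (d : PySem.Dict (List String) Int) wf =>
      d.insert (mergeLoopA wf.1 pair 0 []) wf.2)
    PySem.Dict.empty).items

-- ===== PORT B =====
-- B's inner loop: one token at a time, with 'prev' the pending not-yet-emitted
-- token (none = nothing pending); a match emits the merged token and clears prev.
def mergeLoopB (pair : String × String) : Option String → List String → List String
  | none, [] => []
  | some p, [] => [p]
  | none, t :: rest => mergeLoopB pair (some t) rest
  | some p, t :: rest =>
      if p = pair.1 ∧ t = pair.2 then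
        (pair.1 ++ pair.2) :: mergeLoopB pair none rest
      else
        p :: mergeLoopB pair (some t) rest

def merge_pair_py_alt (word_freqs : List (List String × Int)) (pair : String × String) :
    List (List String × Int) :=
  (word_freqs.foldl
    (fun (d : PySem.Dict (List String) Int) wf =>
      d.insert (mergeLoopB pair none wf.1) wf.2)
    PySem.Dict.empty).items

-- ===== PRECONDITION & SPEC =====
def Spec_merge_pair_py (word_freqs : List (List String × Int)) (pair : String × String) (out : List (List String × Int)) : Prop := out = merge_pair_py_alt word_freqs pair
instance (word_freqs : List (List String × Int)) (pair : String × String) (out : List (List String × Int)) : Decidable (Spec_merge_pair_py word_freqs pair out) := by unfold Spec_merge_pair_py; infer_instance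

-- ===== CLAIM (what is proved, stated in full; the proofs are below) =====
def Claim_equal_merge_pair_py : Prop := ∀ (word_freqs : List (List String × Int)) (pair : String × String), Dom_merge_pair_py word_freqs pair → Spec_merge_pair_py word_freqs pair (merge_pair_py word_freqs pair)

-- ===== LEMMAS AND PROOFS =====

-- A's loop from index i is (accumulator) ++ (B's loop on the dropped suffix).
theorem mergeLoopA_eq_drop (word : List String) (pair : String × String) :
    ∀ i acc, mergeLoopA word pair i acc = acc ++ mergeLoopB pair none (word.drop i) := by
  suffices h : ∀ n i acc, word.length - i ≤ n →
      mergeLoopA word pair i acc = acc ++ mergeLoopB pair none (word.drop i) by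
    intro i acc; exact h (word.length - i) i acc le_rfl
  intro n
  induction n with
  | zero =>
    intro i acc hn
    have hlen : ¬ i < word.length := by omega
    rw [mergeLoopA, if_neg hlen, List.drop_eq_nil_of_le (by omega)]
    simp [mergeLoopB]
  | succ n ih =>
    intro i acc hn
    rw [mergeLoopA]
    by_cases hlen : i < word.length
    · have hdrop : word.drop i = word[i] :: word.drop (i+1) :=
        List.drop_eq_getElem_cons hlen
      have hg1 : word.getD i "" = word[i] := List.getD_eq_getElem _ _ hlen
      by_cases hc : i < word.length - 1 ∧ word.getD i "" = pair.1 ∧ word.getD (i+1) "" = pair.2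
      · -- match branch
        have h1 := hc.1
        have hlt2 : i + 1 < word.length := by omega
        have hdrop2 : word.drop (i+1) = word[i+1] :: word.drop (i+2) :=
          List.drop_eq_getElem_cons hlt2
        have hg2 : word.getD (i+1) "" = word[i+1] := List.getD_eq_getElem _ _ hlt2
        rw [if_pos hlen, if_pos hc, ih (i+2) (acc ++ [pair.1 ++ pair.2]) (by omega), hdrop, hdrop2]
        simp only [mergeLoopB]
        rw [if_pos ⟨by rw [← hg1, hc.2.1], by rw [← hg2, hc.2.2]⟩]
        simp
      · -- no-match branch
        rw [if_pos hlen, if_neg hc, ih (i+1) (acc ++ [word.getD i ""]) (by omega), hdrop]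
        simp only [mergeLoopB]
        rcases Nat.lt_or_ge (i+1) word.length with hlt2 | hge2
        · have hdrop2 : word.drop (i+1) = word[i+1] :: word.drop (i+2) :=
            List.drop_eq_getElem_cons hlt2
          have hne : ¬ (word[i] = pair.1 ∧ word[i+1] = pair.2) := by
            intro ⟨ha, hb⟩
            exact hc ⟨by omega, by rw [hg1, ha], by rw [List.getD_eq_getElem _ _ hlt2, hb]⟩
          rw [hdrop2]
          simp only [mergeLoopB]
          rw [if_neg hne, hg1]
          simp
        · have h0 : word.drop (i+1) = [] := List.drop_eq_nil_of_le hge2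
          rw [h0]
          simp only [mergeLoopB]
          rw [hg1]
          simp
    · rw [if_neg hlen, List.drop_eq_nil_of_le (by omega)]
      simp [mergeLoopB]

-- ===== VERDICT (by name: the statement is the Claim_ definition above) =====
theorem merge_pair_py_spec : Claim_equal_merge_pair_py := by
  intro word_freqs pair _
  unfold Spec_merge_pair_py merge_pair_py merge_pair_py_alt
  have h : ∀ (w : List String), mergeLoopA w pair 0 [] = mergeLoopB pair none w := by
    intro w; rw [mergeLoopA_eq_drop w pair 0 [], List.drop_zero, List.nil_append]
  simp only [h]
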